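-- pv_equiv track=rewrite | github.com/zeyxx/CYNIC | cynic/kernel/organism/metabolism/token_filter.py | compress_shell_output
-- ===== SOURCE A (Python) =====
-- def compress_shell_output(text: str, max_lines: int = 50) -> str:
--     """Removes whitespace, deduplicates repeated logs, and truncates safely."""
--     if not text:
--         return ""
--
--     lines = text.splitlines()
--     filtered = []
--     last_line = ""
--     repeat_count = 0
--
--     for line in lines:
--         line = line.strip()
--         if not line:
--             continue
--
--         if line == last_line:
--             repeat_count += 1
--             continue
--         else:
--             if repeat_count > 0:
--                 filtered.append(f"... (repeated {repeat_count} times)")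
--             repeat_count = 0
--             filtered.append(line)
--             last_line = line
--
--     if repeat_count > 0:
--         filtered.append(f"... (repeated {repeat_count} times)")
--
--     # Truncate middle if too long
--     if len(filtered) > max_lines:
--         half = max_lines // 2
--         filtered = filtered[:half] + ["\n... [TRUNCATED METABOLIC NOISE] ...\n"] + filtered[-half:]
--
--     return "\n".join(filtered)
-- ===== SOURCE B (Python) =====
-- def compress_shell_output(text: str, max_lines: int = 50) -> str:
--     """Removes whitespace, deduplicates repeated logs, and truncates safely."""
--     if not text:
--         return ""
--
--     # Stage 1: stripped, non-empty lines.
--     cleaned = [s for s in map(str.strip, text.splitlines()) if s]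
--
--     # Stage 2: change points — indices where a new run of equal lines begins.
--     starts = [i for i in range(len(cleaned)) if i == 0 or cleaned[i] != cleaned[i - 1]]
--     ends = starts[1:] + [len(cleaned)]
--
--     # Stage 3: emit one line per run, plus a repeat marker for runs longer than 1.
--     filtered = [x
--                 for s, e in zip(starts, ends)
--                 for x in ([cleaned[s]]
--                           + ([f"... (repeated {e - s - 1} times)"] if e - s > 1 else []))]
--
--     if len(filtered) > max_lines:
--         half = max_lines // 2
--         filtered = filtered[:half] + ["\n... [TRUNCATED METABOLIC NOISE] ...\n"] + filtered[-half:]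
--
--     return "\n".join(filtered)
-- ===== Notes on version B (the rewrite author's own statement) =====
-- stated objective: alternative
-- what changed: A's stateful streaming dedupe (last_line/repeat_count carried through one loop interleaved with stripping) is replaced by stateless staged passes: first the stripped non-empty lines, then the list of run change-point indices found by adjacent comparison, then one emission per (start,end) index pair with the run length computed by index arithmetic; truncation and join are unchanged.
import Mathlib
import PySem

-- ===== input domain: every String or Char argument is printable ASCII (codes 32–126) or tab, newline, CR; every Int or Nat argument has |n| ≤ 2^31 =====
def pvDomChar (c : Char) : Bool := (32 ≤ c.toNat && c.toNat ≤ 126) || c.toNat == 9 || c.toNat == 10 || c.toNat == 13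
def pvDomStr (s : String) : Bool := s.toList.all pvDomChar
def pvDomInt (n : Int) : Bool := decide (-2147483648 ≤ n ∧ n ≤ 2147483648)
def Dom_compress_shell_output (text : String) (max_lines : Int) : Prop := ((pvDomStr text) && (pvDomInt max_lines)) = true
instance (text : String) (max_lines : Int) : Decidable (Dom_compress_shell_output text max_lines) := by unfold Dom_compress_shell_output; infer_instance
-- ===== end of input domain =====

-- B replaces A's stateful streaming dedupe by three staged passes over indices: clean, find
-- run change-points by adjacent comparison, then emit per (start,end) pair; same result.

-- ===== PORT A =====

/-- `f"... (repeated {k} times)"` -/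
def pvRepMsg (k : Int) : String := "... (repeated " ++ PySem.Int.toStr k ++ " times)"

/-- one iteration of A's for-loop; state = (filtered, last_line, repeat_count) -/
def pvAStep (st : List String × String × Int) (line : String) : List String × String × Int :=
  let line := PySem.Str.strip line
  if line = "" then st
  else if line = st.2.1 then (st.1, st.2.1, st.2.2 + 1)
  else ((if st.2.2 > 0 then st.1 ++ [pvRepMsg st.2.2] else st.1) ++ [line], line, 0)

def compress_shell_output (text : String) (max_lines : Int) : String :=
  if text = "" then "" else
  let lines := PySem.Str.splitlines text
  let st := lines.foldl pvAStep ([], "", 0)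
  let filtered := if st.2.2 > 0 then st.1 ++ [pvRepMsg st.2.2] else st.1
  let filtered :=
    if (filtered.length : Int) > max_lines then
      let half := PySem.Int.floordiv max_lines 2
      PySem.List.slice filtered none (some half)
        ++ ["\n... [TRUNCATED METABOLIC NOISE] ...\n"]
        ++ PySem.List.slice filtered (some (-half)) none
    else filtered
  PySem.Str.join "\n" filtered

-- ===== PORT B =====
-- Indexing `cleaned[i]` / `cleaned[i-1]` is ported as `getD _ ""`: every index used is in
-- range (i ∈ range len, i-1 only read when i ≠ 0, starts/ends are in-range indices), so this
-- is exact for the Python.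

def compress_shell_output_alt (text : String) (max_lines : Int) : String :=
  if text = "" then "" else
  let cleaned := ((PySem.Str.splitlines text).map PySem.Str.strip).filter (· ≠ "")
  let starts := (List.range cleaned.length).filter
    (fun i => i == 0 || cleaned.getD i "" != cleaned.getD (i - 1) "")
  let ends := starts.drop 1 ++ [cleaned.length]
  let filtered := (starts.zip ends).flatMap
    (fun se => cleaned.getD se.1 "" ::
      (if ((se.2 : Int) - se.1 > 1) then [pvRepMsg ((se.2 : Int) - se.1 - 1)] else []))
  let filtered :=
    if (filtered.length : Int) > max_lines then
      let half := PySem.Int.floordiv max_lines 2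
      PySem.List.slice filtered none (some half)
        ++ ["\n... [TRUNCATED METABOLIC NOISE] ...\n"]
        ++ PySem.List.slice filtered (some (-half)) none
    else filtered
  PySem.Str.join "\n" filtered

-- ===== PRECONDITION & SPEC =====
def Spec_compress_shell_output (text : String) (max_lines : Int) (out : String) : Prop := out = compress_shell_output_alt text max_lines
instance (text : String) (max_lines : Int) (out : String) : Decidable (Spec_compress_shell_output text max_lines out) := by unfold Spec_compress_shell_output; infer_instance

-- ===== CLAIM (what is proved, stated in full; the proofs are below) =====
def Claim_equal_compress_shell_output : Prop := ∀ (text : String) (max_lines : Int), Dom_compress_shell_output text max_lines → Spec_compress_shell_output text max_lines (compress_shell_output text max_lines)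

-- ===== LEMMAS AND PROOFS =====

/-- consecutive runs of a list of strings as (key, length) pairs (like itertools.groupby) -/
def pvRuns : List String → List (String × Nat)
  | [] => []
  | x :: xs =>
    let p := xs.span (· == x)
    (x, p.1.length + 1) :: pvRuns p.2
termination_by xs => xs.length
decreasing_by
  simp only [List.span_eq_takeWhile_dropWhile, List.length_cons]
  have := List.length_dropWhile_le (p := (· == x)) (l := xs)
  omega

/-- A's dedupe step on an already-stripped, nonempty line -/
def pvDStep (st : List String × String × Int) (line : String) : List String × String × Int :=
  if line = st.2.1 then (st.1, st.2.1, st.2.2 + 1)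
  else ((if st.2.2 > 0 then st.1 ++ [pvRepMsg st.2.2] else st.1) ++ [line], line, 0)

/-- finalize A's state -/
def pvFin (st : List String × String × Int) : List String :=
  if st.2.2 > 0 then st.1 ++ [pvRepMsg st.2.2] else st.1

/-- what A emits from state (last, rc) over the rest of the cleaned lines -/
def pvEmitRuns (last : String) (rc : Int) : List String → List String
  | [] => if rc > 0 then [pvRepMsg rc] else []
  | x :: xs =>
    if x = last then pvEmitRuns last (rc + 1) xs
    else (if rc > 0 then [pvRepMsg rc] else []) ++ x :: pvEmitRuns x 0 xs

/-- what one run contributes to the output -/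
def pvEmit (kv : String × Nat) : List String :=
  kv.1 :: (if kv.2 > 1 then [pvRepMsg ((kv.2 : Int) - 1)] else [])

lemma pvFold_clean (lines : List String) (st : List String × String × Int) :
    lines.foldl pvAStep st
      = ((lines.map PySem.Str.strip).filter (· ≠ "")).foldl pvDStep st := by
  induction lines generalizing st with
  | nil => rfl
  | cons l ls ih =>
    simp only [List.foldl_cons, List.map_cons, List.filter_cons]
    by_cases h : PySem.Str.strip l = ""
    · rw [show pvAStep st l = st from by simp [pvAStep, h]]
      rw [if_neg (by simp [h])]
      exact ih st
    · rw [show pvAStep st l = pvDStep st (PySem.Str.strip l) from by simp [pvAStep, pvDStep, h]]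
      rw [if_pos (by simp [h])]
      exact ih _

lemma pvFin_fold (xs : List String) (f : List String) (last : String) (rc : Int) :
    pvFin (xs.foldl pvDStep (f, last, rc)) = f ++ pvEmitRuns last rc xs := by
  induction xs generalizing f last rc with
  | nil => simp [pvFin, pvEmitRuns]; split <;> simp
  | cons x xs ih =>
    simp only [List.foldl_cons, pvDStep, pvEmitRuns]
    by_cases h : x = last
    · simp [h, ih]
    · simp only [h, if_false, ih]
      split <;> simp

lemma pvEmitRuns_runs (n : Nat) (xs : List String) (last : String) (rc : Int)
    (hrc : 0 ≤ rc) (hn : xs.length ≤ n) :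
    pvEmitRuns last rc xs
      = (if rc + ((xs.span (· == last)).1.length : Int) > 0
          then [pvRepMsg (rc + ((xs.span (· == last)).1.length : Int))] else [])
        ++ ((pvRuns (xs.span (· == last)).2).flatMap pvEmit) := by
  induction n generalizing xs last rc with
  | zero =>
    have : xs = [] := List.length_eq_zero_iff.mp (Nat.le_zero.mp hn)
    subst this
    simp [pvEmitRuns, pvRuns, List.span_eq_takeWhile_dropWhile]
  | succ n ih =>
    cases xs with
    | nil => simp [pvEmitRuns, pvRuns, List.span_eq_takeWhile_dropWhile]
    | cons y ys =>
      simp only [List.span_eq_takeWhile_dropWhile, List.takeWhile_cons, List.dropWhile_cons]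
      by_cases h : y = last
      · have hb : (y == last) = true := by simp [h]
        simp only [hb, if_true, List.length_cons, pvEmitRuns, if_pos h]
        have := ih ys last (rc + 1) (by omega) (by simpa using Nat.le_of_succ_le_succ hn)
        simp only [List.span_eq_takeWhile_dropWhile] at this
        rw [this]
        have harith : rc + 1 + ((ys.takeWhile (· == last)).length : Int)
            = rc + (((ys.takeWhile (· == last)).length + 1 : Nat) : Int) := by push_cast; ring
        rw [harith]
      · have hb : (y == last) = false := by simp [h]
        have hih := ih ys y 0 le_rfl (by simpa using Nat.le_of_succ_le_succ hn)
        simp only [List.span_eq_takeWhile_dropWhile] at hih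
        have hruns : pvRuns (y :: ys)
            = (y, (ys.takeWhile (· == y)).length + 1)
              :: pvRuns (ys.dropWhile (· == y)) := by
          rw [pvRuns]
          simp [List.span_eq_takeWhile_dropWhile]
        simp only [hb, Bool.false_eq_true, if_false, List.length_nil, Nat.cast_zero,
          add_zero, pvEmitRuns, if_neg h, hruns, List.flatMap_cons, hih, pvEmit]
        by_cases hl : (ys.takeWhile (· == y)).length = 0
        · simp [hl]
        · have h1 : ((0 : Int) + ((ys.takeWhile (· == y)).length : Int) > 0) := by omega
          have h2 : ((ys.takeWhile (· == y)).length + 1 > 1) := by omega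
          simp only [if_pos h1, if_pos h2]
          have : (((ys.takeWhile (· == y)).length + 1 : Nat) : Int) - 1
              = 0 + ((ys.takeWhile (· == y)).length : Int) := by push_cast; ring
          rw [this]
          simp

lemma pvSpan_of_ne_nil (xs : List String) (h : ∀ x ∈ xs, x ≠ "") :
    xs.span (· == "") = ([], xs) := by
  cases xs with
  | nil => simp [List.span_eq_takeWhile_dropWhile]
  | cons y ys =>
    have : (y == "") = false := by
      simp only [beq_eq_false_iff_ne]; exact h y (List.mem_cons_self)
    simp [List.span_eq_takeWhile_dropWhile, this]

/-- A's filtered list is the run-emission over the cleaned lines. -/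
lemma pvA_runs (lines : List String) :
    pvFin (lines.foldl pvAStep ([], "", 0))
      = (pvRuns ((lines.map PySem.Str.strip).filter (· ≠ ""))).flatMap pvEmit := by
  rw [pvFold_clean, pvFin_fold]
  set cl := (lines.map PySem.Str.strip).filter (· ≠ "") with hcl
  have hne : ∀ x ∈ cl, x ≠ "" := by
    intro x hx
    have := List.of_mem_filter hx
    simpa using this
  have hspan := pvSpan_of_ne_nil cl hne
  have h0 := pvEmitRuns_runs cl.length cl "" 0 le_rfl le_rfl
  rw [hspan] at h0
  simpa using h0

-- ===== B-side: change-point indices describe the runs =====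

/-- B's change-point predicate -/
def pvIsStart (xs : List String) (i : Nat) : Bool :=
  i == 0 || xs.getD i "" != xs.getD (i - 1) ""

def pvStarts (xs : List String) : List Nat := (List.range xs.length).filter (pvIsStart xs)

def pvEnds (xs : List String) : List Nat := (pvStarts xs).drop 1 ++ [xs.length]

/-- B's emission from (start,end) pairs, indexing into `base` -/
def pvEmitIdx (base : List String) (pairs : List (Nat × Nat)) : List String :=
  pairs.flatMap (fun se => base.getD se.1 "" ::
    (if ((se.2 : Int) - se.1 > 1) then [pvRepMsg ((se.2 : Int) - se.1 - 1)] else []))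

lemma pvFilter_range_nil (k : Nat) (p : Nat → Bool) (h : ∀ i, i < k → p i = false) :
    (List.range k).filter p = [] := by
  rw [List.filter_eq_nil_iff]
  intro i hi
  simp [h i (List.mem_range.mp hi)]

lemma pvDropWhile_head_false (p : String → Bool) (l : List String) (b : String)
    (e : List String) (h : l.dropWhile p = b :: e) : p b = false := by
  induction l with
  | nil => simp at h
  | cons x xs ih =>
    rw [List.dropWhile_cons] at h
    by_cases hp : p x = true
    · simp [hp] at h; exact ih h
    · simp [hp] at h; rw [h.1] at hp; simpa using hp

lemma pvStarts_cons (a : String) (ys : List String) :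
    pvStarts (a :: ys)
      = 0 :: (pvStarts (ys.dropWhile (· == a))).map
          (· + ((ys.takeWhile (· == a)).length + 1)) := by
  set t := ys.takeWhile (· == a) with ht
  set d := ys.dropWhile (· == a) with hd
  set k := t.length with hk
  have hyd : t ++ d = ys := List.takeWhile_append_dropWhile
  have ftd : ∀ i, i < k → ys.getD i "" = a := by
    intro i hi
    rw [← hyd, List.getD_append _ _ _ i hi, List.getD_eq_getElem t "" hi]
    have hm : t[i] ∈ t := List.getElem_mem hi
    have hm2 : t[i] ∈ ys.takeWhile (· == a) := by rw [← ht]; exact hm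
    have := List.mem_takeWhile_imp hm2
    simpa using this
  have fd : ∀ j, ys.getD (k + j) "" = d.getD j "" := by
    intro j
    rw [← hyd, List.getD_append_right t d "" (k + j) (by omega)]
    congr 1
    omega
  have hprev : ∀ i, i ≤ k → (a :: ys).getD i "" = a := by
    intro i hi
    cases i with
    | zero => rfl
    | succ i' => rw [List.getD_cons_succ]; exact ftd i' (by omega)
  have s0 : ∀ i, i < k → pvIsStart (a :: ys) (i + 1) = false := by
    intro i hi
    unfold pvIsStart
    have h1 : ys[i]?.getD "" = a := by
      rw [← List.getD_eq_getElem?_getD]; exact ftd i hi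
    have h2 : (a :: ys)[i]?.getD "" = a := by
      rw [← List.getD_eq_getElem?_getD]; exact hprev i (by omega)
    simp [h1, h2]
  have s1 : ∀ j, j < d.length → pvIsStart (a :: ys) (k + j + 1) = pvIsStart d j := by
    intro j hj
    cases j with
    | zero =>
      have hdne : d ≠ [] := by
        intro hc
        rw [hc] at hj
        simp at hj
      obtain ⟨b, e, hde⟩ := List.exists_cons_of_ne_nil hdne
      have hba : (b == a) = false :=
        pvDropWhile_head_false (· == a) ys b e (by rw [← hd]; exact hde)
      have hbna : b ≠ a := by simpa using hba
      have fd0 : ys[k]?.getD "" = b := by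
        rw [← List.getD_eq_getElem?_getD]
        have := fd 0
        simp only [Nat.add_zero] at this
        rw [this, hde]
        rfl
      have h2 : (a :: ys)[k]?.getD "" = a := by
        rw [← List.getD_eq_getElem?_getD]; exact hprev k (by omega)
      have hrhs : pvIsStart d 0 = true := by unfold pvIsStart; simp
      rw [hrhs]
      unfold pvIsStart
      simp [fd0, h2, hbna]
    | succ j' =>
      unfold pvIsStart
      have e1 : ys.getD (k + (j' + 1)) "" = d.getD (j' + 1) "" := fd (j' + 1)
      have e2 : ys.getD (k + j') "" = d.getD j' "" := fd j'
      have hidx : k + (j' + 1) + 1 - 1 = (k + j') + 1 := by omega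
      rw [hidx, List.getD_cons_succ, List.getD_cons_succ, e1, e2]
      simp
  -- main computation
  unfold pvStarts
  rw [show (a :: ys).length = ys.length + 1 from rfl, List.range_succ_eq_map,
    List.filter_cons]
  rw [if_pos (by unfold pvIsStart; simp)]
  rw [List.filter_map]
  congr 1
  rw [show ys.length = k + d.length from by
      rw [← hyd, List.length_append, hk],
    List.range_add, List.filter_append, List.filter_map,
    pvFilter_range_nil k _ (fun i hi => by
      simpa using s0 i hi),
    List.nil_append,
    List.filter_congr (fun j hj => by
      have := s1 j (List.mem_range.mp hj)
      simpa using this),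
    List.map_map]
  apply List.map_congr_left
  intro j _
  simp only [Function.comp_apply, Nat.succ_eq_add_one]
  omega

lemma pvEmitIdx_shift (pre rest : List String) (pairs : List (Nat × Nat)) :
    pvEmitIdx (pre ++ rest)
        (pairs.map (Prod.map (· + pre.length) (· + pre.length)))
      = pvEmitIdx rest pairs := by
  induction pairs with
  | nil => rfl
  | cons p ps ih =>
    unfold pvEmitIdx at ih ⊢
    simp only [List.map_cons, List.flatMap_cons, ih]
    congr 1
    have hg : (pre ++ rest).getD (p.1 + pre.length) "" = rest.getD p.1 "" := by
      rw [List.getD_append_right _ _ _ _ (by omega)]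
      congr 1
      omega
    have harith : ((p.2 + pre.length : Nat) : Int) - ((p.1 + pre.length : Nat) : Int)
        = (p.2 : Int) - p.1 := by push_cast; ring
    simp only [Prod.map, hg, harith]

lemma pvRuns_cons (a : String) (ys : List String) :
    pvRuns (a :: ys)
      = (a, (ys.takeWhile (· == a)).length + 1) :: pvRuns (ys.dropWhile (· == a)) := by
  rw [pvRuns]
  simp [List.span_eq_takeWhile_dropWhile]

lemma pvB_runs (n : Nat) (xs : List String) (hn : xs.length ≤ n) :
    pvEmitIdx xs ((pvStarts xs).zip (pvEnds xs)) = (pvRuns xs).flatMap pvEmit := by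
  induction n generalizing xs with
  | zero =>
    have : xs = [] := List.length_eq_zero_iff.mp (Nat.le_zero.mp hn)
    subst this
    simp [pvEmitIdx, pvStarts, pvEnds, pvRuns]
  | succ n ih =>
    cases xs with
    | nil => simp [pvEmitIdx, pvStarts, pvEnds, pvRuns]
    | cons a ys =>
      set t := ys.takeWhile (· == a) with ht
      set d := ys.dropWhile (· == a) with hd
      set k := t.length with hk
      have hyd : t ++ d = ys := List.takeWhile_append_dropWhile
      have hdlen : d.length ≤ ys.length := by rw [hd]; exact List.length_dropWhile_le _ _
      have hynk : ys.length ≤ n := by simpa using hn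
      have hlen : (a :: ys).length = d.length + (k + 1) := by
        simp only [List.length_cons]
        rw [← hyd, List.length_append, hk]
        omega
      have hruns := pvRuns_cons a ys
      rw [← ht, ← hd, ← hk] at hruns
      have hstarts := pvStarts_cons a ys
      rw [← ht, ← hd, ← hk] at hstarts
      have hxs : a :: ys = (a :: t) ++ d := by rw [List.cons_append, hyd]
      have hpre : (a :: t).length = k + 1 := by simp [hk]
      unfold pvEnds
      rw [hstarts, hruns, List.flatMap_cons, List.drop_one, List.tail_cons, hlen]
      cases hds : pvStarts d with
      | nil =>
        have hdnil : d = [] := by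
          by_contra hc
          obtain ⟨b, e, hde⟩ := List.exists_cons_of_ne_nil hc
          rw [hde, pvStarts_cons] at hds
          simp at hds
        rw [hdnil] at hruns ⊢
        simp only [List.map_nil, List.nil_append, List.length_nil, Nat.zero_add]
        unfold pvEmitIdx
        simp only [List.zip_cons_cons, List.zip_nil_left, List.flatMap_cons,
          List.flatMap_nil, List.append_nil, pvEmit, pvRuns]
        have hg0 : (a :: ys).getD 0 "" = a := rfl
        rw [hg0]
        congr 1
        by_cases hkz : k = 0
        · rw [hkz]; norm_num
        · rw [if_pos (by push_cast; omega), if_pos (by omega)]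
          congr 1
      | cons s0' S' =>
        have hdne : d ≠ [] := by
          intro hc
          rw [hc] at hds
          simp [pvStarts] at hds
        have hs0' : s0' = 0 := by
          obtain ⟨b, e, hde⟩ := List.exists_cons_of_ne_nil hdne
          rw [hde, pvStarts_cons] at hds
          exact (List.cons_eq_cons.mp hds).1.symm
        subst hs0'
        simp only [List.map_cons, Nat.zero_add, List.cons_append, List.zip_cons_cons]
        have htail :
            ((k + 1) :: S'.map (· + (k + 1))).zip
                (S'.map (· + (k + 1)) ++ [d.length + (k + 1)])
              = ((pvStarts d).zip (pvEnds d)).map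
                  (Prod.map (· + (k + 1)) (· + (k + 1))) := by
          have h1 : (k + 1) :: S'.map (· + (k + 1)) = (pvStarts d).map (· + (k + 1)) := by
            rw [hds]
            simp
          have h2 : S'.map (· + (k + 1)) ++ [d.length + (k + 1)]
              = (pvEnds d).map (· + (k + 1)) := by
            unfold pvEnds
            rw [hds]
            simp
          rw [h1, h2, List.zip_map]
        unfold pvEmitIdx
        rw [List.flatMap_cons, htail]
        have hshift :
            ((((pvStarts d).zip (pvEnds d)).map
                (Prod.map (· + (k + 1)) (· + (k + 1)))).flatMap
              (fun se => (a :: ys).getD se.1 "" ::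
                (if ((se.2 : Int) - se.1 > 1) then [pvRepMsg ((se.2 : Int) - se.1 - 1)]
                 else [])))
              = (pvRuns d).flatMap pvEmit := by
          have hsh := pvEmitIdx_shift (a :: t) d ((pvStarts d).zip (pvEnds d))
          rw [hpre] at hsh
          unfold pvEmitIdx at hsh
          rw [← hxs] at hsh
          rw [hsh]
          exact ih d (by omega)
        rw [hshift]
        congr 1
        have hg0 : (a :: ys).getD 0 "" = a := rfl
        rw [hg0]
        unfold pvEmit
        congr 1
        by_cases hkz : k = 0
        · rw [hkz]; norm_num
        · rw [if_pos (by push_cast; omega), if_pos (by omega)]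
          congr 1

-- ===== VERDICT (by name: the statement is the Claim_ definition above) =====
theorem compress_shell_output_spec : Claim_equal_compress_shell_output := by
  intro text max_lines _
  unfold Spec_compress_shell_output compress_shell_output compress_shell_output_alt
  by_cases h : text = ""
  · simp [h]
  · simp only [if_neg h]
    have hA := pvA_runs (PySem.Str.splitlines text)
    unfold pvFin at hA
    have hB := pvB_runs (((PySem.Str.splitlines text).map PySem.Str.strip).filter (· ≠ "")).length
      (((PySem.Str.splitlines text).map PySem.Str.strip).filter (· ≠ "")) le_rfl
    simp only [pvEmitIdx, pvEnds, pvStarts] at hB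
    rw [hA, ← hB]
    rfl
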